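-- pv_equiv track=rewrite | github.com/Aryudesu/ABC | ABC/400_499/439/D.py | calc
-- ===== SOURCE A (Python) =====
-- from bisect import bisect_left, bisect_right
--
-- def calc(sevs, fivs, thrs):
--     result = 0
--     for k in fivs:
--         fiv = fivs[k]
--         tmp1 = sevs.get(k)
--         tmp2 = thrs.get(k)
--         if tmp1 is None or tmp2 is None:
--             continue
--         for f in fiv:
--             idx1 = bisect_left(tmp1, f)
--             idx2 = bisect_left(tmp2, f)
--             result += idx1 * idx2
--             idx1 = bisect_right(tmp1, f)
--             idx2 = bisect_right(tmp2, f)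
--             result += (len(tmp1) - idx1) * (len(tmp2) - idx2)
--     return result
-- ===== SOURCE B (Python) =====
-- def _search(a, x, left, lo, n):
--     # recursive "meta" binary search on the window [lo, lo+n):
--     # returns bisect_left (left=True) / bisect_right (left=False) position.
--     if n == 0:
--         return lo
--     half = n // 2
--     mid = lo + half
--     if (a[mid] < x) if left else (a[mid] <= x):
--         return _search(a, x, left, mid + 1, n - half - 1)
--     return _search(a, x, left, lo, half)
--
--
-- def calc(sevs, fivs, thrs):
--     total = 0
--     for k, fiv in fivs.items():
--         tmp1 = sevs.get(k)
--         tmp2 = thrs.get(k)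
--         if tmp1 is None or tmp2 is None:
--             continue
--         n1 = len(tmp1)
--         n2 = len(tmp2)
--         counts = {}
--         for v in fiv:
--             counts[v] = counts.get(v, 0) + 1
--         for v, m in counts.items():
--             total += m * (_search(tmp1, v, True, 0, n1) * _search(tmp2, v, True, 0, n2)
--                           + (n1 - _search(tmp1, v, False, 0, n1)) * (n2 - _search(tmp2, v, False, 0, n2)))
--     return total
-- ===== Notes on version B (the rewrite author's own statement) =====
-- stated objective: alternative
-- what changed: B iterates fivs.items() and, per shared key, groups fiv's occurrences in a hand-built count dict so each distinct value is searched once, replacing the four library bisect calls per occurrence with one recursive meta-binary-search helper over a shrinking window.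
import Mathlib
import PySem

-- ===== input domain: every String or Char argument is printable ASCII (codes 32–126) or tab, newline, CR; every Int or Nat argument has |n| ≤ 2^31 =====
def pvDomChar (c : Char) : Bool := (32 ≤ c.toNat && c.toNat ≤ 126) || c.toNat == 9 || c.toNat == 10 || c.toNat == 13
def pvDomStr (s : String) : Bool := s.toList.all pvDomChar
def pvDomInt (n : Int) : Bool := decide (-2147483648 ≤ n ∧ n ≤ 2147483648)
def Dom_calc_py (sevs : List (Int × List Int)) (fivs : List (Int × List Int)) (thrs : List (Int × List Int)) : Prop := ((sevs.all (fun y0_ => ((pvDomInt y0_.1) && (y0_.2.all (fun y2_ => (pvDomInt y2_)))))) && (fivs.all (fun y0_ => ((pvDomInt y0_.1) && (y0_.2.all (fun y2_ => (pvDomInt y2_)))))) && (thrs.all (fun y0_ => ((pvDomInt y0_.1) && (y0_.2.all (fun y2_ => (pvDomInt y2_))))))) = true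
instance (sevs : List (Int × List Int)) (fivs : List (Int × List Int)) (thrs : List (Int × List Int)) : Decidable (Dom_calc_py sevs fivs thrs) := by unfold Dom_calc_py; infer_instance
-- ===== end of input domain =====

-- B replaces the four library bisect calls per occurrence by one recursive meta-binary-search
-- done once per DISTINCT value of fiv (a hand-built counter dict), an alternative decomposition
-- of the same cost; return-value equivalence is proved on all inputs.

-- ===== PORT A =====
-- literal transliteration of A: iterate the keys of fivs, look each key up in sevs/thrs,
-- and for every element f of fiv add bisect_left products and (len - bisect_right) products.
-- (fivs[k] inside the loop cannot raise: k comes from fivs' own keys; getD's default is unreachable.)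
def calc_py (sevs : List (Int × List Int)) (fivs : List (Int × List Int)) (thrs : List (Int × List Int)) : Int :=
  let sevsD := PySem.Dict.ofList sevs
  let fivsD := PySem.Dict.ofList fivs
  let thrsD := PySem.Dict.ofList thrs
  fivsD.keys.foldl (init := (0 : Int)) (fun result k =>
    let fiv := fivsD.getD k []
    match sevsD.get? k, thrsD.get? k with
    | some tmp1, some tmp2 =>
        fiv.foldl (init := result) (fun result f =>
          let idx1 := PySem.List.bisectLeft tmp1 f
          let idx2 := PySem.List.bisectLeft tmp2 f
          let result := result + (idx1 : Int) * (idx2 : Int)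
          let idx1' := PySem.List.bisectRight tmp1 f
          let idx2' := PySem.List.bisectRight tmp2 f
          result + ((tmp1.length : Int) - (idx1' : Int)) * ((tmp2.length : Int) - (idx2' : Int)))
    | _, _ => result)

-- ===== PORT B =====
-- Source B's _search: recursive meta binary search on the window [lo, lo+n).
-- (Source B indexes a[mid] directly; every actual call keeps mid in range, so the
-- out-of-range fallback 'lo' is unreachable.)
def pvBsearch (a : List Int) (x : Int) (left : Bool) (lo : Nat) (n : Nat) : Nat :=
  match n with
  | 0 => lo
  | Nat.succ m =>
      let half := (m + 1) / 2
      let mid := lo + half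
      match a[mid]? with
      | none => lo
      | some y =>
          if (if left then y < x else y ≤ x) then
            pvBsearch a x left (mid + 1) (m - half)
          else
            pvBsearch a x left lo half
  termination_by n
  decreasing_by
  · omega
  · omega

def calc_py_alt (sevs : List (Int × List Int)) (fivs : List (Int × List Int)) (thrs : List (Int × List Int)) : Int :=
  let sevsD := PySem.Dict.ofList sevs
  let thrsD := PySem.Dict.ofList thrs
  (PySem.Dict.ofList fivs).items.foldl (init := (0 : Int)) (fun total p =>
    match sevsD.get? p.1 with
    | none => total
    | some tmp1 =>
      match thrsD.get? p.1 with
      | none => total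
      | some tmp2 =>
        let n1 := tmp1.length
        let n2 := tmp2.length
        let counts := p.2.foldl (fun d v => d.insert v (d.getD v 0 + 1)) PySem.Dict.empty
        counts.items.foldl (init := total) (fun total pm =>
          total + pm.2 * ((pvBsearch tmp1 pm.1 true 0 n1 : Int) * (pvBsearch tmp2 pm.1 true 0 n2 : Int)
            + ((n1 : Int) - (pvBsearch tmp1 pm.1 false 0 n1 : Int)) * ((n2 : Int) - (pvBsearch tmp2 pm.1 false 0 n2 : Int)))))

-- ===== PRECONDITION & SPEC =====
def Spec_calc_py (sevs : List (Int × List Int)) (fivs : List (Int × List Int)) (thrs : List (Int × List Int)) (out : Int) : Prop := out = calc_py_alt sevs fivs thrs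
instance (sevs : List (Int × List Int)) (fivs : List (Int × List Int)) (thrs : List (Int × List Int)) (out : Int) : Decidable (Spec_calc_py sevs fivs thrs out) := by unfold Spec_calc_py; infer_instance

-- ===== CLAIM (what is proved, stated in full; the proofs are below) =====
def Claim_equal_calc_py : Prop := ∀ (sevs : List (Int × List Int)) (fivs : List (Int × List Int)) (thrs : List (Int × List Int)), Dom_calc_py sevs fivs thrs → Spec_calc_py sevs fivs thrs (calc_py sevs fivs thrs)

-- ===== LEMMAS AND PROOFS =====

-- B's meta binary search computes the same positions as the bisect loops, on ANY list.
theorem bisectLeftLoop_eq_bsearch (a : List Int) (x : Int) :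
    ∀ (fuel lo n : Nat), n ≤ fuel →
      PySem.List.bisectLeftLoop a x fuel lo (lo + n) = pvBsearch a x true lo n := by
  intro fuel
  induction fuel with
  | zero =>
      intro lo n hn
      interval_cases n
      simp [PySem.List.bisectLeftLoop, pvBsearch]
  | succ f ih =>
      intro lo n hn
      match n with
      | 0 => simp [PySem.List.bisectLeftLoop, pvBsearch]
      | Nat.succ m =>
          rw [pvBsearch]
          simp only [PySem.List.bisectLeftLoop]
          have hlt : lo < lo + (m + 1) := by omega
          have hmid : (lo + (lo + (m + 1))) / 2 = lo + (m + 1) / 2 := by omega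
          simp only [if_pos hlt, hmid]
          cases hy : a[lo + (m + 1) / 2]? with
          | none => rfl
          | some y =>
              by_cases h : y < x
              · simp only [if_pos h]
                have : lo + (m + 1) = (lo + (m + 1) / 2 + 1) + (m - (m + 1) / 2) := by omega
                rw [this, ih _ _ (by omega)]
                simp [h]
              · simp only [if_neg h]
                rw [show lo + (m + 1) / 2 = lo + ((m + 1) / 2) from rfl, ih _ _ (by omega)]
                simp [h]

theorem bisectRightLoop_eq_bsearch (a : List Int) (x : Int) :
    ∀ (fuel lo n : Nat), n ≤ fuel →
      PySem.List.bisectRightLoop a x fuel lo (lo + n) = pvBsearch a x false lo n := by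
  intro fuel
  induction fuel with
  | zero =>
      intro lo n hn
      interval_cases n
      simp [PySem.List.bisectRightLoop, pvBsearch]
  | succ f ih =>
      intro lo n hn
      match n with
      | 0 => simp [PySem.List.bisectRightLoop, pvBsearch]
      | Nat.succ m =>
          rw [pvBsearch]
          simp only [PySem.List.bisectRightLoop]
          have hlt : lo < lo + (m + 1) := by omega
          have hmid : (lo + (lo + (m + 1))) / 2 = lo + (m + 1) / 2 := by omega
          simp only [if_pos hlt, hmid]
          cases hy : a[lo + (m + 1) / 2]? with
          | none => rfl
          | some y =>
              by_cases h : x < y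
              · simp only [if_pos h]
                rw [show lo + (m + 1) / 2 = lo + ((m + 1) / 2) from rfl, ih _ _ (by omega)]
                simp [not_le.mpr h]
              · simp only [if_neg h]
                have : lo + (m + 1) = (lo + (m + 1) / 2 + 1) + (m - (m + 1) / 2) := by omega
                rw [this, ih _ _ (by omega)]
                simp [not_lt.mp h]

theorem bisectLeft_eq_bsearch (a : List Int) (x : Int) :
    PySem.List.bisectLeft a x = pvBsearch a x true 0 a.length := by
  have := bisectLeftLoop_eq_bsearch a x a.length 0 a.length le_rfl
  simpa [PySem.List.bisectLeft] using this

theorem bisectRight_eq_bsearch (a : List Int) (x : Int) :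
    PySem.List.bisectRight a x = pvBsearch a x false 0 a.length := by
  have := bisectRightLoop_eq_bsearch a x a.length 0 a.length le_rfl
  simpa [PySem.List.bisectRight] using this

-- summing a function over a list = summing multiplicity × value over any nodup superset of its elements
theorem sum_if_single (s : List Int) (hs : s.Nodup) (f : Int) (hf : f ∈ s) (g : Int → Int) :
    (s.map (fun v => if v = f then g v else 0)).sum = g f := by
  induction s with
  | nil => cases hf
  | cons a t ih =>
      simp only [List.map_cons, List.sum_cons]
      rcases List.mem_cons.mp hf with h | h
      · have ha : a = f := h.symm
        have hz : (t.map (fun v => if v = f then g v else 0)).sum = 0 := by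
          apply List.sum_eq_zero
          intro x hx
          rcases List.mem_map.mp hx with ⟨v, hv, rfl⟩
          have : v ≠ f := fun e => (List.nodup_cons.mp hs).1 (by rw [ha]; exact e ▸ hv)
          simp [this]
        rw [if_pos ha, hz, ha]
        ring
      · have hne : a ≠ f := fun e => (List.nodup_cons.mp hs).1 (e ▸ h)
        rw [if_neg hne, ih (List.nodup_cons.mp hs).2 h]
        ring

theorem sum_count_group (l : List Int) (s : List Int) (hs : s.Nodup)
    (hsub : ∀ x ∈ l, x ∈ s) (g : Int → Int) :
    (s.map (fun v => (l.count v : Int) * g v)).sum = (l.map g).sum := by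
  induction l with
  | nil => simp
  | cons f t ih =>
      have hsplit : ∀ v : Int, (((f :: t).count v : Int)) * g v
          = ((t.count v : Int)) * g v + (if v = f then g v else 0) := by
        intro v
        rw [List.count_cons]
        by_cases h : f = v
        · subst h; simp; ring
        · have : ¬ v = f := fun e => h e.symm
          simp [h, this]
      calc (s.map (fun v => ((f :: t).count v : Int) * g v)).sum
          = (s.map (fun v => ((t.count v : Int)) * g v + (if v = f then g v else 0))).sum := by
            exact congrArg List.sum (List.map_congr_left (fun v _ => hsplit v))
        _ = (s.map (fun v => ((t.count v : Int)) * g v)).sum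
              + (s.map (fun v => if v = f then g v else 0)).sum :=
            PySem.List.sum_map_add_int s _ _
        _ = (t.map g).sum + g f := by
            rw [ih (fun x hx => hsub x (List.mem_cons_of_mem _ hx)),
                sum_if_single s hs f (hsub f (List.mem_cons_self)) g]
        _ = ((f :: t).map g).sum := by simp [add_comm]

-- first-match lookup on a list whose firsts are nodup finds the member itself
theorem find?_of_mem_nodup (its : List (Int × List Int))
    (h : (its.map Prod.fst).Nodup) (p : Int × List Int) (hp : p ∈ its) :
    its.find? (fun q => q.1 == p.1) = some p := by
  induction its with
  | nil => cases hp
  | cons a t ih =>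
      rcases List.mem_cons.mp hp with rfl | hp'
      · simp [List.find?]
      · have hne : a.1 ≠ p.1 := by
          intro e
          have : p.1 ∈ t.map Prod.fst := List.mem_map_of_mem hp'
          exact (List.nodup_cons.mp h).1 (e ▸ this)
        have hb : (a.1 == p.1) = false := by simp [hne]
        have h2 : (t.map Prod.fst).Nodup := (List.nodup_cons.mp h).2
        simp [List.find?, hb, ih h2 hp']

theorem getD_of_mem_items (fivs : List (Int × List Int)) (p : Int × List Int)
    (hp : p ∈ (PySem.Dict.ofList fivs).items) :
    (PySem.Dict.ofList fivs).getD p.1 [] = p.2 := by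
  have hnd := PySem.Dict.nodup_keys_ofList (ν := List Int) fivs
  simp only [PySem.Dict.keys] at hnd
  have := find?_of_mem_nodup (PySem.Dict.ofList fivs).items hnd p hp
  simp [PySem.Dict.getD, PySem.Dict.get?, this]

-- folding a dict's keys with a lookup = folding its items
theorem foldl_keys_eq_items (its : List (Int × List Int)) (G : Int → List Int)
    (F : Int → Int → List Int → Int) (a : Int)
    (h : ∀ p ∈ its, G p.1 = p.2) :
    (its.map (fun x => x.1)).foldl (fun r k => F r k (G k)) a
      = its.foldl (fun r p => F r p.1 p.2) a := by
  rw [List.foldl_map]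
  exact PySem.List.foldl_congr_mem its _ _ a (fun acc p hp => by rw [h p hp])

-- the per-element contribution of a value f, shared by both programs
theorem inner_loops_eq (tmp1 tmp2 fiv : List Int) (r : Int) :
    fiv.foldl (fun result f =>
        result + (PySem.List.bisectLeft tmp1 f : Int) * (PySem.List.bisectLeft tmp2 f : Int)
          + ((tmp1.length : Int) - (PySem.List.bisectRight tmp1 f : Int))
            * ((tmp2.length : Int) - (PySem.List.bisectRight tmp2 f : Int))) r
      = (PySem.Dict.counter fiv).items.foldl (fun total pm =>
          total + pm.2 * ((pvBsearch tmp1 pm.1 true 0 tmp1.length : Int) * (pvBsearch tmp2 pm.1 true 0 tmp2.length : Int)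
            + ((tmp1.length : Int) - (pvBsearch tmp1 pm.1 false 0 tmp1.length : Int))
              * ((tmp2.length : Int) - (pvBsearch tmp2 pm.1 false 0 tmp2.length : Int)))) r := by
  set c : Int → Int := fun f =>
    (PySem.List.bisectLeft tmp1 f : Int) * (PySem.List.bisectLeft tmp2 f : Int)
      + ((tmp1.length : Int) - (PySem.List.bisectRight tmp1 f : Int))
        * ((tmp2.length : Int) - (PySem.List.bisectRight tmp2 f : Int)) with hc
  have hA : fiv.foldl (fun result f =>
      result + (PySem.List.bisectLeft tmp1 f : Int) * (PySem.List.bisectLeft tmp2 f : Int)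
        + ((tmp1.length : Int) - (PySem.List.bisectRight tmp1 f : Int))
          * ((tmp2.length : Int) - (PySem.List.bisectRight tmp2 f : Int))) r
      = r + (fiv.map c).sum := by
    rw [← PySem.List.foldl_add fiv c r]
    exact PySem.List.foldl_congr_mem fiv _ _ r (fun acc f _ => by rw [hc]; ring)
  have hB : (PySem.Dict.counter fiv).items.foldl (fun total pm =>
        total + pm.2 * ((pvBsearch tmp1 pm.1 true 0 tmp1.length : Int) * (pvBsearch tmp2 pm.1 true 0 tmp2.length : Int)
          + ((tmp1.length : Int) - (pvBsearch tmp1 pm.1 false 0 tmp1.length : Int))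
            * ((tmp2.length : Int) - (pvBsearch tmp2 pm.1 false 0 tmp2.length : Int)))) r
      = r + ((PySem.Set.ofList fiv).map (fun v => (fiv.count v : Int) * c v)).sum := by
    rw [PySem.Dict.items_counter]
    have e1 := PySem.List.foldl_congr_mem
      ((PySem.Set.ofList fiv).map (fun k => (k, (fiv.count k : Int))))
      (fun total pm =>
        total + pm.2 * ((pvBsearch tmp1 pm.1 true 0 tmp1.length : Int) * (pvBsearch tmp2 pm.1 true 0 tmp2.length : Int)
          + ((tmp1.length : Int) - (pvBsearch tmp1 pm.1 false 0 tmp1.length : Int))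
            * ((tmp2.length : Int) - (pvBsearch tmp2 pm.1 false 0 tmp2.length : Int))))
      (fun total pm => total + pm.2 * c pm.1) r
      (fun acc pm _ => by
        rw [hc]
        simp only [← bisectLeft_eq_bsearch, ← bisectRight_eq_bsearch])
    have e2 := PySem.List.foldl_add
      ((PySem.Set.ofList fiv).map (fun k => (k, (fiv.count k : Int))))
      (fun pm : Int × Int => pm.2 * c pm.1) r
    rw [e1, e2, List.map_map]
    rfl
  rw [hA, hB, sum_count_group fiv (PySem.Set.ofList fiv) (PySem.Set.nodup_ofList fiv)
      (fun x hx => (PySem.Set.mem_ofList fiv x).mpr hx) c]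

-- ===== VERDICT (by name: the statement is the Claim_ definition above) =====
theorem calc_py_spec : Claim_equal_calc_py := by
  intro sevs fivs thrs _
  unfold Spec_calc_py calc_py calc_py_alt
  simp only [PySem.Dict.keys, PySem.Dict.foldl_insert_getD_add_one_eq_counter]
  refine Eq.trans (foldl_keys_eq_items (PySem.Dict.ofList fivs).items
      (fun k => (PySem.Dict.ofList fivs).getD k [])
      (fun r k fiv =>
        match (PySem.Dict.ofList sevs).get? k, (PySem.Dict.ofList thrs).get? k with
        | some tmp1, some tmp2 =>
            fiv.foldl (init := r) (fun result f =>
              result + (PySem.List.bisectLeft tmp1 f : Int) * (PySem.List.bisectLeft tmp2 f : Int)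
                + ((tmp1.length : Int) - (PySem.List.bisectRight tmp1 f : Int))
                  * ((tmp2.length : Int) - (PySem.List.bisectRight tmp2 f : Int)))
        | _, _ => r) 0
      (fun p hp => getD_of_mem_items fivs p hp)) ?_
  apply PySem.List.foldl_congr_mem
  intro acc p _
  cases h1 : (PySem.Dict.ofList sevs).get? p.1 with
  | none => simp only [h1]
  | some tmp1 =>
      cases h2 : (PySem.Dict.ofList thrs).get? p.1 with
      | none => simp only [h1, h2]
      | some tmp2 =>
          simp only [h1, h2]
          exact inner_loops_eq tmp1 tmp2 p.2 acc
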